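-- pv_equiv track=rewrite | github.com/milkrong/Basic-Python-DS-Algs | LeetCode/triple/3.py | almost_palindromes
-- ===== SOURCE A (Python) =====
-- def almost_palindromes(str):
--     reversed_string = str[::-1]
--     cnt = 0
--     for i, j in zip(str, reversed_string):
--         if i == j:
--             continue
--         else:
--             cnt += 1
--     return cnt
-- ===== SOURCE B (Python) =====
-- def almost_palindromes(str):
--     n = len(str)
--     stack = []
--     for c in str[: n // 2]:
--         stack.append(c)
--     cnt = 0
--     for c in str[(n + 1) // 2:]:
--         if c != stack.pop():
--             cnt += 2
--     return cnt
-- ===== Notes on version B (the rewrite author's own statement) =====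
-- stated objective: alternative
-- what changed: B uses the classic stack method: it pushes the first half of the string onto a stack, then scans the second half popping and comparing, adding 2 per mismatched pair -- no reversed copy, no zip over all n positions.
import Mathlib
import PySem

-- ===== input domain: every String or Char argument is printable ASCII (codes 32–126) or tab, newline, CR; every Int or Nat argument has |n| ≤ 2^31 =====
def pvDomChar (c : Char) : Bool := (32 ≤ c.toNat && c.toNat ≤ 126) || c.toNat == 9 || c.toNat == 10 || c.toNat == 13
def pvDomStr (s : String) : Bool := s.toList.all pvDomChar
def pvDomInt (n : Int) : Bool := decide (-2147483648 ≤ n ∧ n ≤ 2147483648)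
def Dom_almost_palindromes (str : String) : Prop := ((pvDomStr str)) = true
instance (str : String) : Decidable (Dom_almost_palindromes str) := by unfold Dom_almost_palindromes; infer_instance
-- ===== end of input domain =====

-- B replaces A's reversed-copy-and-zip scan by the stack method: push the first half,
-- then pop while scanning the second half, adding 2 per mismatched pair (objective: alternative).

-- ===== PORT A =====
-- reversed_string = str[::-1]; zip both strings; count positions where the chars differ.
def almost_palindromes (str : String) : Int :=
  let reversed_string : String := (PySem.Str.slice? str none none (-1)).getD ""  -- step -1 ≠ 0: never none
  (str.toList.zip reversed_string.toList).foldl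
    (fun cnt ij => if ij.1 == ij.2 then cnt else cnt + 1) 0

-- ===== PORT B =====
-- n = len(str); push str[: n//2] onto a stack; for c in str[(n+1)//2 :]: pop and compare,
-- cnt += 2 on mismatch.  The LIFO stack (Python append/pop at the end) is transcribed as
-- cons/head at the front, the standard functional stack.
def almost_palindromes_alt (str : String) : Int :=
  let l := str.toList
  let n : Int := PySem.Str.len str
  let stack : List Char :=
    (PySem.List.slice l none (some (PySem.Int.floordiv n 2))).foldl
      (fun st c => c :: st) ([] : List Char)
  let r : List Char × Int :=
    (PySem.List.slice l (some (PySem.Int.floordiv (n + 1) 2)) none).foldl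
      (fun (p : List Char × Int) c =>
        match p.1 with
        | [] => (p.1, p.2)  -- unreachable: the stack holds n//2 chars, exactly the second slice's length (Python would raise IndexError)
        | top :: rest => (rest, if c ≠ top then p.2 + 2 else p.2))
      (stack, 0)
  r.2

-- ===== PRECONDITION & SPEC =====
def Spec_almost_palindromes (str : String) (out : Int) : Prop := out = almost_palindromes_alt str
instance (str : String) (out : Int) : Decidable (Spec_almost_palindromes str out) := by unfold Spec_almost_palindromes; infer_instance

-- ===== CLAIM (what is proved, stated in full; the proofs are below) =====
def Claim_equal_almost_palindromes : Prop := ∀ (str : String), Dom_almost_palindromes str → Spec_almost_palindromes str (almost_palindromes str)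

-- ===== LEMMAS AND PROOFS =====

-- 1 iff position i mismatches its mirror position (of a list l of length n)
def pvMism (l : List Char) (i : ℕ) : ℕ :=
  if l.getD i ' ' ≠ l.getD (l.length - 1 - i) ' ' then 1 else 0

theorem pvMism_le_one (l : List Char) (i : ℕ) : pvMism l i ≤ 1 := by
  unfold pvMism; split <;> omega

theorem pvMism_symm (l : List Char) (i : ℕ) (hi : i < l.length) :
    pvMism l (l.length - 1 - i) = pvMism l i := by
  unfold pvMism
  have h2 : l.length - 1 - (l.length - 1 - i) = i := by omega
  rw [h2]
  rcases eq_or_ne (l.getD i ' ') (l.getD (l.length - 1 - i) ' ') with h | h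
  · rw [h]
  · rw [if_pos (Ne.symm h), if_pos h]

theorem pvMism_mid (l : List Char) (i : ℕ) (h : i = l.length - 1 - i) : pvMism l i = 0 := by
  unfold pvMism; rw [← h]; simp

-- the reflection identity: a symmetric 0/1 profile with zero middle sums to twice its first half
theorem pvSum_reflect (l : List Char) :
    ∑ i ∈ Finset.range l.length, pvMism l i
      = 2 * ∑ i ∈ Finset.range (l.length / 2), pvMism l i := by
  set n := l.length with hn
  rcases Nat.eq_zero_or_pos n with h0 | hpos
  · simp [h0]
  have hsplit : ∑ i ∈ Finset.range n, pvMism l i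
      = (∑ i ∈ Finset.range (n / 2), pvMism l i) + ∑ i ∈ Finset.Ico (n / 2) n, pvMism l i := by
    rw [Finset.range_eq_Ico]
    exact (Finset.sum_Ico_consecutive _ (Nat.zero_le _) (Nat.div_le_self n 2)).symm
  have hcongr : ∑ i ∈ Finset.Ico (n / 2) n, pvMism l i
      = ∑ i ∈ Finset.Ico (n / 2) n, pvMism l (n - 1 - i) := by
    refine Finset.sum_congr rfl fun i hi => ?_
    rw [Finset.mem_Ico] at hi
    exact (pvMism_symm l i (by omega)).symm
  have hrefl : ∑ i ∈ Finset.Ico (n / 2) n, pvMism l (n - 1 - i)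
      = ∑ i ∈ Finset.Ico (n - 1 + 1 - n) (n - 1 + 1 - n / 2), pvMism l i :=
    Finset.sum_Ico_reflect (pvMism l) (n / 2) (by omega)
  have harith1 : n - 1 + 1 - n = 0 := by omega
  have harith2 : n - 1 + 1 - n / 2 = n - n / 2 := by omega
  rw [hsplit, hcongr, hrefl, harith1, harith2, ← Finset.range_eq_Ico]
  rcases Nat.even_or_odd n with he | ho
  · obtain ⟨k, hk⟩ := he
    have : n - n / 2 = n / 2 := by omega
    rw [this]; ring
  · obtain ⟨k, hk⟩ := ho
    have : n - n / 2 = n / 2 + 1 := by omega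
    rw [this, Finset.sum_range_succ, pvMism_mid l (n / 2) (by omega)]
    ring

-- A's zip of a list with its reverse, elementwise
theorem pvZip_reverse (l : List Char) :
    l.zip l.reverse = (List.range l.length).map
      (fun i => (l.getD i ' ', l.getD (l.length - 1 - i) ' ')) := by
  apply List.ext_getElem
  · simp
  · intro i h1 h2
    simp only [List.getElem_zip, List.getElem_map, List.getElem_range]
    have hi : i < l.length := by simpa using h1
    simp only [Prod.mk.injEq]
    constructor
    · simp [List.getD_eq_getElem?_getD, List.getElem?_eq_getElem hi]
    · rw [List.getElem_reverse]
      have hm : l.length - 1 - i < l.length := by omega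
      simp [List.getD_eq_getElem?_getD, List.getElem?_eq_getElem hm]

-- fold counting hits of a 0/1-valued profile = its sum (Int-valued accumulator)
theorem pvFoldl_count (g : ℕ → ℕ) (hg : ∀ x, g x ≤ 1) (xs : List ℕ) (a : Int) :
    xs.foldl (fun cnt i => if g i = 1 then cnt + 1 else cnt) a
      = a + ((xs.map g).sum : ℕ) := by
  induction xs generalizing a with
  | nil => simp
  | cons x t ih =>
    have hx := hg x
    simp only [List.foldl_cons, List.map_cons, List.sum_cons]
    by_cases h : g x = 1
    · rw [if_pos h, ih, h]; push_cast; ring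
    · rw [if_neg h, ih]
      have h0 : g x = 0 := by omega
      rw [h0]; push_cast; ring

theorem pvA_eq (str : String) :
    almost_palindromes str = ((∑ i ∈ Finset.range str.toList.length, pvMism str.toList i : ℕ) : Int) := by
  have hstep : almost_palindromes str
      = (str.toList.zip ((PySem.Str.slice? str none none (-1)).getD "").toList).foldl
          (fun cnt ij => if ij.1 == ij.2 then cnt else cnt + 1) 0 := rfl
  rw [hstep, PySem.Str.slice?_none_none_neg_one]
  rw [show ((some (String.ofList str.toList.reverse)).getD "").toList = str.toList.reverse from by simp]
  rw [pvZip_reverse]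
  set l := str.toList with hl
  have hfold : ∀ (xs : List ℕ) (a : Int),
      (((xs.map (fun i => (l.getD i ' ', l.getD (l.length - 1 - i) ' ')))).foldl
        (fun cnt ij => if ij.1 == ij.2 then cnt else cnt + 1) a)
      = xs.foldl (fun cnt i => if pvMism l i = 1 then cnt + 1 else cnt) a := by
    intro xs
    induction xs with
    | nil => intro a; rfl
    | cons x t ih =>
      intro a
      simp only [List.map_cons, List.foldl_cons, ih]
      congr 1
      unfold pvMism
      by_cases h : l.getD x ' ' = l.getD (l.length - 1 - x) ' ' <;> simp only [List.getD_eq_getElem?_getD] at h ⊢ <;> simp [h]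
  rw [hfold, pvFoldl_count (pvMism l) (pvMism_le_one l)]
  simp [Finset.range, Multiset.range, Finset.sum]

-- pushing a list onto a stack reverses it
theorem pvFoldl_push (xs acc : List Char) :
    xs.foldl (fun st c => c :: st) acc = xs.reverse ++ acc := by
  induction xs generalizing acc with
  | nil => simp
  | cons x t ih => simp [List.foldl_cons, ih]

-- 1 iff the two chars of a pair differ
def pvMism2 (p : Char × Char) : ℕ := if p.1 ≠ p.2 then 1 else 0

-- B's pop-and-compare fold = twice the pairwise mismatch count of xs zipped with the stack
theorem pvFold_pop (xs : List Char) :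
    ∀ (st : List Char) (cnt : Int), xs.length ≤ st.length →
    (xs.foldl
      (fun (p : List Char × Int) c =>
        match p.1 with
        | [] => (p.1, p.2)
        | top :: rest => (rest, if c ≠ top then p.2 + 2 else p.2))
      (st, cnt)).2 = cnt + 2 * (((xs.zip st).map pvMism2).sum : ℕ) := by
  induction xs with
  | nil => intro st cnt _; simp
  | cons x t ih =>
    intro st cnt hlen
    cases st with
    | nil => simp at hlen
    | cons top rest =>
      simp only [List.foldl_cons, List.zip_cons_cons, List.map_cons, List.sum_cons]
      rw [ih rest _ (by simpa using hlen)]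
      have hp : pvMism2 (x, top) = if x ≠ top then 1 else 0 := rfl
      rw [hp]
      rcases eq_or_ne x top with h | h
      · rw [if_neg (by simp [h]), if_neg (by simp [h])]; push_cast; ring
      · rw [if_pos h, if_pos h]; push_cast; ring

-- the second half zipped with the reversed first half, elementwise
theorem pvZip_second (l : List Char) :
    (l.drop ((l.length + 1) / 2)).zip (l.take (l.length / 2)).reverse
      = (List.range (l.length / 2)).map
          (fun i => (l.getD ((l.length + 1) / 2 + i) ' ', l.getD (l.length / 2 - 1 - i) ' ')) := by
  set n := l.length with hn
  have hdl : (l.drop ((n + 1) / 2)).length = n / 2 := by simp [hn]; omega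
  have htl : ((l.take (n / 2)).reverse).length = n / 2 := by simp [hn]; omega
  apply List.ext_getElem
  · simp [hdl, htl]
  · intro i h1 h2
    have hi : i < n / 2 := by
      simpa [hdl, htl] using h1
    simp only [List.getElem_zip, List.getElem_map, List.getElem_range, Prod.mk.injEq]
    have hk : (n + 1) / 2 + i < n := by omega
    have hm : n / 2 - 1 - i < n := by omega
    constructor
    · rw [List.getElem_drop]
      simp [List.getD_eq_getElem?_getD, List.getElem?_eq_getElem (by omega : (n+1)/2 + i < l.length)]
    · rw [List.getElem_reverse, List.getElem_take]
      have : (l.take (n / 2)).length - 1 - i = n / 2 - 1 - i := by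
        simp [hn]; omega
      simp only [this]
      simp [List.getD_eq_getElem?_getD, List.getElem?_eq_getElem (by omega : n/2 - 1 - i < l.length)]

theorem pvB_eq (str : String) :
    almost_palindromes_alt str
      = 2 * ((∑ i ∈ Finset.range (str.toList.length / 2), pvMism str.toList i : ℕ) : Int) := by
  have hstep : almost_palindromes_alt str
      = ((PySem.List.slice str.toList (some (PySem.Int.floordiv (PySem.Str.len str + 1) 2)) none).foldl
          (fun (p : List Char × Int) c =>
            match p.1 with
            | [] => (p.1, p.2)
            | top :: rest => (rest, if c ≠ top then p.2 + 2 else p.2))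
          ((PySem.List.slice str.toList none (some (PySem.Int.floordiv (PySem.Str.len str) 2))).foldl
            (fun st c => c :: st) ([] : List Char), 0)).2 := rfl
  rw [hstep]
  set l := str.toList with hl
  have hlen : PySem.Str.len str = (l.length : Int) := by rw [hl]; simp
  set n := l.length with hn
  have hfd1 : PySem.Int.floordiv (PySem.Str.len str) 2 = ((n / 2 : ℕ) : Int) := by
    rw [hlen, PySem.Int.floordiv, Int.fdiv_eq_ediv_of_nonneg _ (by positivity)]
    omega
  have hfd2 : PySem.Int.floordiv (PySem.Str.len str + 1) 2 = (((n + 1) / 2 : ℕ) : Int) := by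
    rw [hlen, PySem.Int.floordiv, Int.fdiv_eq_ediv_of_nonneg _ (by positivity)]
    omega
  rw [hfd1, hfd2, PySem.List.slice_to_natCast, PySem.List.slice_from_natCast, pvFoldl_push]
  rw [List.append_nil]
  have hle : (l.drop ((n + 1) / 2)).length ≤ ((l.take (n / 2)).reverse).length := by
    simp [hn]; omega
  rw [pvFold_pop _ _ _ hle, pvZip_second]
  have hmap : ∀ i ∈ List.range (n / 2),
      pvMism2 (l.getD ((n + 1) / 2 + i) ' ', l.getD (n / 2 - 1 - i) ' ')
        = pvMism l (n / 2 - 1 - i) := by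
    intro i hi
    have hi' : i < n / 2 := List.mem_range.mp hi
    unfold pvMism2 pvMism
    have hidx : l.length - 1 - (n / 2 - 1 - i) = (n + 1) / 2 + i := by
      rw [← hn]; omega
    rw [hidx]
    rcases eq_or_ne (l.getD ((n + 1) / 2 + i) ' ') (l.getD (n / 2 - 1 - i) ' ') with h | h
    · simp only [List.getD_eq_getElem?_getD] at h; simp [h]
    · rw [if_pos h, if_pos (Ne.symm h)]
  rw [List.map_map]
  simp only [Function.comp_def]
  rw [List.map_congr_left hmap]
  have hsum : ((List.range (n / 2)).map (fun i => pvMism l (n / 2 - 1 - i))).sum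
      = ∑ i ∈ Finset.range (n / 2), pvMism l i := by
    have : ((List.range (n / 2)).map (fun i => pvMism l (n / 2 - 1 - i))).sum
        = ∑ i ∈ Finset.range (n / 2), pvMism l (n / 2 - 1 - i) := by
      simp [Finset.range, Multiset.range, Finset.sum]
    rw [this, Finset.sum_range_reflect]
  rw [hsum]
  push_cast; ring

-- ===== VERDICT (by name: the statement is the Claim_ definition above) =====
theorem almost_palindromes_spec : Claim_equal_almost_palindromes := by
  intro str _
  unfold Spec_almost_palindromes
  rw [pvA_eq, pvB_eq, pvSum_reflect]
  push_cast
  ring
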